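-- pv_equiv track=rewrite | github.com/akshay-greenlang/Code-V1_GreenLang | GreenLang Development/01-Core-Platform/agents/policy/cbam_compliance_agent.py | classify_product
-- ===== SOURCE A (Python) =====
-- from enum import Enum
-- from typing import Any, Dict, List, Optional
--
-- class CBAMProductCategory(str, Enum):
--     """CBAM product categories."""
--     # Cement
--     CEMENT_CLINKER = "cement_clinker"
--     CEMENT = "cement"
--     ALUMINOUS_CEMENT = "aluminous_cement"
--     # Iron and Steel
--     PIG_IRON = "pig_iron"
--     FERRO_ALLOYS = "ferro_alloys"
--     CRUDE_STEEL = "crude_steel"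
--     STEEL_PRODUCTS = "steel_products"
--     # Aluminium
--     UNWROUGHT_ALUMINIUM = "unwrought_aluminium"
--     ALUMINIUM_PRODUCTS = "aluminium_products"
--     # Fertilisers
--     AMMONIA = "ammonia"
--     NITRIC_ACID = "nitric_acid"
--     MIXED_FERTILISERS = "mixed_fertilisers"
--     # Hydrogen
--     HYDROGEN = "hydrogen"
--     # Electricity
--     ELECTRICITY = "electricity"
--
-- def classify_product(
--
--     cn_code: str
-- ) -> Optional[CBAMProductCategory]:
--     """Classify a product by CN code."""
--     # CN code prefixes for CBAM products
--     cn_prefixes = {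
--         "2523": CBAMProductCategory.CEMENT,
--         "2507": CBAMProductCategory.CEMENT_CLINKER,
--         "7201": CBAMProductCategory.PIG_IRON,
--         "7202": CBAMProductCategory.FERRO_ALLOYS,
--         "7206": CBAMProductCategory.CRUDE_STEEL,
--         "7207": CBAMProductCategory.STEEL_PRODUCTS,
--         "7601": CBAMProductCategory.UNWROUGHT_ALUMINIUM,
--         "7604": CBAMProductCategory.ALUMINIUM_PRODUCTS,
--         "2814": CBAMProductCategory.AMMONIA,
--         "2808": CBAMProductCategory.NITRIC_ACID,
--         "3102": CBAMProductCategory.MIXED_FERTILISERS,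
--         "2804": CBAMProductCategory.HYDROGEN,
--         "2716": CBAMProductCategory.ELECTRICITY,
--     }
--
--     clean_code = cn_code.replace(" ", "").replace(".", "")
--     for prefix, category in cn_prefixes.items():
--         if clean_code.startswith(prefix):
--             return category
--     return None
-- ===== SOURCE B (Python) =====
-- def classify_product(cn_code):
--     """Classify a product by CN code via a hand-rolled digit decision tree (no table scan)."""
--     clean = cn_code.replace(" ", "").replace(".", "")
--     if len(clean) < 4:
--         return None
--     c0, c1, c2, c3 = clean[0], clean[1], clean[2], clean[3]
--     if c0 == "2":
--         if c1 == "5":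
--             if c2 == "0":
--                 return "cement_clinker" if c3 == "7" else None
--             if c2 == "2":
--                 return "cement" if c3 == "3" else None
--             return None
--         if c1 == "7":
--             return "electricity" if c2 == "1" and c3 == "6" else None
--         if c1 == "8":
--             if c2 == "0":
--                 if c3 == "4":
--                     return "hydrogen"
--                 if c3 == "8":
--                     return "nitric_acid"
--                 return None
--             if c2 == "1":
--                 return "ammonia" if c3 == "4" else None
--             return None
--         return None
--     if c0 == "3":
--         return "mixed_fertilisers" if c1 == "1" and c2 == "0" and c3 == "2" else None
--     if c0 == "7":
--         if c1 == "2":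
--             if c2 == "0":
--                 if c3 == "1":
--                     return "pig_iron"
--                 if c3 == "2":
--                     return "ferro_alloys"
--                 if c3 == "6":
--                     return "crude_steel"
--                 if c3 == "7":
--                     return "steel_products"
--                 return None
--             return None
--         if c1 == "6":
--             if c2 == "0":
--                 if c3 == "1":
--                     return "unwrought_aluminium"
--                 if c3 == "4":
--                     return "aluminium_products"
--                 return None
--             return None
--         return None
--     return None
-- ===== Notes on version B (the rewrite author's own statement) =====
-- stated objective: alternative
-- what changed: Replaces the linear scan of 13 startswith tests against a prefix table by a hand-rolled digit-by-digit decision tree (nested branching on the first four cleaned characters), so no table and no string-prefix comparison exists at all.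
import Mathlib
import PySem

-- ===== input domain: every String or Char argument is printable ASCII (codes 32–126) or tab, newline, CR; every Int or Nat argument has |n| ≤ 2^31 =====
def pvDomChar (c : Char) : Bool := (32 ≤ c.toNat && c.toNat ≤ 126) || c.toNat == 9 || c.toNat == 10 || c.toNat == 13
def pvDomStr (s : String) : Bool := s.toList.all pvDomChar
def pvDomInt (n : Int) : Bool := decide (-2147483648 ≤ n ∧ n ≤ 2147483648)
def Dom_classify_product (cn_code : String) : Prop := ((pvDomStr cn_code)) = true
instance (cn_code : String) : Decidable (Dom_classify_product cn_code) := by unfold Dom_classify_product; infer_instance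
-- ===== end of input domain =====

-- B replaces A's linear startswith scan over a prefix table by a digit-by-digit decision tree on the first four cleaned characters (alternative decomposition, same cost).

-- ===== PORT A =====
-- the CN-prefix table, in A's insertion order
def pvPrefixes : List (String × String) :=
  [("2523", "cement"), ("2507", "cement_clinker"), ("7201", "pig_iron"),
   ("7202", "ferro_alloys"), ("7206", "crude_steel"), ("7207", "steel_products"),
   ("7601", "unwrought_aluminium"), ("7604", "aluminium_products"), ("2814", "ammonia"),
   ("2808", "nitric_acid"), ("3102", "mixed_fertilisers"), ("2804", "hydrogen"),
   ("2716", "electricity")]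

-- A's 'for prefix, category in cn_prefixes.items(): if clean_code.startswith(prefix): return category'
def pvLoopA (clean : String) : List (String × String) → Option String
  | [] => none
  | (p, c) :: rest => if PySem.Str.startswith clean p then some c else pvLoopA clean rest

def classify_product (cn_code : String) : Option String :=
  let clean := PySem.Str.replace (PySem.Str.replace cn_code " " "") "." ""
  pvLoopA clean pvPrefixes

-- ===== PORT B =====
-- B's nested-if decision tree on the four leading characters
def pvTree (c0 c1 c2 c3 : Char) : Option String :=
  if c0 = '2' then
    if c1 = '5' then
      if c2 = '0' then (if c3 = '7' then some "cement_clinker" else none)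
      else if c2 = '2' then (if c3 = '3' then some "cement" else none)
      else none
    else if c1 = '7' then (if c2 = '1' ∧ c3 = '6' then some "electricity" else none)
    else if c1 = '8' then
      if c2 = '0' then
        if c3 = '4' then some "hydrogen"
        else if c3 = '8' then some "nitric_acid"
        else none
      else if c2 = '1' then (if c3 = '4' then some "ammonia" else none)
      else none
    else none
  else if c0 = '3' then
    (if c1 = '1' ∧ c2 = '0' ∧ c3 = '2' then some "mixed_fertilisers" else none)
  else if c0 = '7' then
    if c1 = '2' then
      if c2 = '0' then
        if c3 = '1' then some "pig_iron"
        else if c3 = '2' then some "ferro_alloys"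
        else if c3 = '6' then some "crude_steel"
        else if c3 = '7' then some "steel_products"
        else none
      else none
    else if c1 = '6' then
      if c2 = '0' then
        if c3 = '1' then some "unwrought_aluminium"
        else if c3 = '4' then some "aluminium_products"
        else none
      else none
    else none
  else none

-- B's 'if len(clean) < 4: return None' length guard plus the indexing clean[0] .. clean[3]
def pvDispatch (l : List Char) : Option String :=
  match l with
  | c0 :: c1 :: c2 :: c3 :: _ => pvTree c0 c1 c2 c3
  | _ => none

def classify_product_alt (cn_code : String) : Option String :=
  let clean := PySem.Str.replace (PySem.Str.replace cn_code " " "") "." ""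
  pvDispatch clean.toList

-- ===== PRECONDITION & SPEC =====
def Spec_classify_product (cn_code : String) (out : Option String) : Prop := out = classify_product_alt cn_code
instance (cn_code : String) (out : Option String) : Decidable (Spec_classify_product cn_code out) := by unfold Spec_classify_product; infer_instance

-- ===== CLAIM (what is proved, stated in full; the proofs are below) =====
def Claim_equal_classify_product : Prop := ∀ (cn_code : String), Dom_classify_product cn_code → Spec_classify_product cn_code (classify_product cn_code)

-- ===== LEMMAS AND PROOFS =====

-- startswith with a 4-char pattern on a list with ≥ 4 elements is the conjunction of the four char tests
theorem pv_sw4 (c0 c1 c2 c3 p0 p1 p2 p3 : Char) (rest : List Char) :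
    PySem.Chars.startswith (c0::c1::c2::c3::rest) [p0,p1,p2,p3]
      = (c0 == p0 && (c1 == p1 && (c2 == p2 && c3 == p3))) := by
  simp [PySem.Chars.startswith, List.isPrefixOf, BEq.comm]

-- startswith with a 4-char pattern on a shorter list is false
theorem pv_sw_short (l : List Char) (h : l.length < 4) (p0 p1 p2 p3 : Char) :
    PySem.Chars.startswith l [p0,p1,p2,p3] = false := by
  rw [← Bool.not_eq_true, PySem.Chars.startswith_iff]
  intro hp; have := hp.length_le; simp at this; omega

set_option maxHeartbeats 1000000 in
-- the 13-test chain, as a pure function of the four chars, equals B's decision tree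
theorem pv_ct (c0 c1 c2 c3 : Char) :
    (if (c0 == '2' && (c1 == '5' && (c2 == '2' && c3 == '3'))) then some "cement"
     else (if (c0 == '2' && (c1 == '5' && (c2 == '0' && c3 == '7'))) then some "cement_clinker"
     else (if (c0 == '7' && (c1 == '2' && (c2 == '0' && c3 == '1'))) then some "pig_iron"
     else (if (c0 == '7' && (c1 == '2' && (c2 == '0' && c3 == '2'))) then some "ferro_alloys"
     else (if (c0 == '7' && (c1 == '2' && (c2 == '0' && c3 == '6'))) then some "crude_steel"
     else (if (c0 == '7' && (c1 == '2' && (c2 == '0' && c3 == '7'))) then some "steel_products"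
     else (if (c0 == '7' && (c1 == '6' && (c2 == '0' && c3 == '1'))) then some "unwrought_aluminium"
     else (if (c0 == '7' && (c1 == '6' && (c2 == '0' && c3 == '4'))) then some "aluminium_products"
     else (if (c0 == '2' && (c1 == '8' && (c2 == '1' && c3 == '4'))) then some "ammonia"
     else (if (c0 == '2' && (c1 == '8' && (c2 == '0' && c3 == '8'))) then some "nitric_acid"
     else (if (c0 == '3' && (c1 == '1' && (c2 == '0' && c3 == '2'))) then some "mixed_fertilisers"
     else (if (c0 == '2' && (c1 == '8' && (c2 == '0' && c3 == '4'))) then some "hydrogen"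
     else (if (c0 == '2' && (c1 == '7' && (c2 == '1' && c3 == '6'))) then some "electricity"
     else none))))))))))))) = pvTree c0 c1 c2 c3 := by
  by_cases h0 : c0 = '2'
  · by_cases h1 : c1 = '5'
    · by_cases h2 : c2 = '0'
      · by_cases h3 : c3 = '7' <;> simp_all [pvTree]
      · by_cases h2b : c2 = '2'
        · by_cases h3 : c3 = '3' <;> simp_all [pvTree]
        · simp_all [pvTree]
    · by_cases h1b : c1 = '7'
      · by_cases h2 : c2 = '1'
        · by_cases h3 : c3 = '6' <;> simp_all [pvTree]
        · simp_all [pvTree]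
      · by_cases h1c : c1 = '8'
        · by_cases h2 : c2 = '0'
          · by_cases h3 : c3 = '4'
            · simp_all [pvTree]
            · by_cases h3b : c3 = '8' <;> simp_all [pvTree]
          · by_cases h2b : c2 = '1'
            · by_cases h3 : c3 = '4' <;> simp_all [pvTree]
            · simp_all [pvTree]
        · simp_all [pvTree]
  · by_cases h0b : c0 = '3'
    · by_cases h1 : c1 = '1'
      · by_cases h2 : c2 = '0'
        · by_cases h3 : c3 = '2' <;> simp_all [pvTree]
        · simp_all [pvTree]
      · simp_all [pvTree]
    · by_cases h0c : c0 = '7'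
      · by_cases h1 : c1 = '2'
        · by_cases h2 : c2 = '0'
          · by_cases h3 : c3 = '1'
            · simp_all [pvTree]
            · by_cases h3b : c3 = '2'
              · simp_all [pvTree]
              · by_cases h3c : c3 = '6'
                · simp_all [pvTree]
                · by_cases h3d : c3 = '7' <;> simp_all [pvTree]
          · simp_all [pvTree]
        · by_cases h1b : c1 = '6'
          · by_cases h2 : c2 = '0'
            · by_cases h3 : c3 = '1'
              · simp_all [pvTree]
              · by_cases h3b : c3 = '4' <;> simp_all [pvTree]
            · simp_all [pvTree]
          · simp_all [pvTree]
      · simp_all [pvTree]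


-- A's loop on a string with ≥ 4 chars reduces to the chain, hence the tree
theorem pv_chain_eq_tree (s : String) (c0 c1 c2 c3 : Char) (rest : List Char)
    (h : s.toList = c0::c1::c2::c3::rest) :
    pvLoopA s pvPrefixes = pvTree c0 c1 c2 c3 := by
  have e0 : ("2523":String).toList = ['2','5','2','3'] := by simp
  have e1 : ("2507":String).toList = ['2','5','0','7'] := by simp
  have e2 : ("7201":String).toList = ['7','2','0','1'] := by simp
  have e3 : ("7202":String).toList = ['7','2','0','2'] := by simp
  have e4 : ("7206":String).toList = ['7','2','0','6'] := by simp
  have e5 : ("7207":String).toList = ['7','2','0','7'] := by simp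
  have e6 : ("7601":String).toList = ['7','6','0','1'] := by simp
  have e7 : ("7604":String).toList = ['7','6','0','4'] := by simp
  have e8 : ("2814":String).toList = ['2','8','1','4'] := by simp
  have e9 : ("2808":String).toList = ['2','8','0','8'] := by simp
  have e10 : ("3102":String).toList = ['3','1','0','2'] := by simp
  have e11 : ("2804":String).toList = ['2','8','0','4'] := by simp
  have e12 : ("2716":String).toList = ['2','7','1','6'] := by simp
  simp only [pvLoopA, pvPrefixes, PySem.Str.startswith_eq, e0, e1, e2, e3, e4, e5, e6, e7, e8, e9, e10, e11, e12, h, pv_sw4]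
  exact pv_ct c0 c1 c2 c3

-- on a string of fewer than 4 chars, A's loop finds no match
theorem pv_chain_short (s : String) (h : s.toList.length < 4) :
    pvLoopA s pvPrefixes = none := by
  have e0 : ("2523":String).toList = ['2','5','2','3'] := by simp
  have e1 : ("2507":String).toList = ['2','5','0','7'] := by simp
  have e2 : ("7201":String).toList = ['7','2','0','1'] := by simp
  have e3 : ("7202":String).toList = ['7','2','0','2'] := by simp
  have e4 : ("7206":String).toList = ['7','2','0','6'] := by simp
  have e5 : ("7207":String).toList = ['7','2','0','7'] := by simp
  have e6 : ("7601":String).toList = ['7','6','0','1'] := by simp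
  have e7 : ("7604":String).toList = ['7','6','0','4'] := by simp
  have e8 : ("2814":String).toList = ['2','8','1','4'] := by simp
  have e9 : ("2808":String).toList = ['2','8','0','8'] := by simp
  have e10 : ("3102":String).toList = ['3','1','0','2'] := by simp
  have e11 : ("2804":String).toList = ['2','8','0','4'] := by simp
  have e12 : ("2716":String).toList = ['2','7','1','6'] := by simp
  simp only [pvLoopA, pvPrefixes, PySem.Str.startswith_eq, e0, e1, e2, e3, e4, e5, e6, e7, e8, e9, e10, e11, e12]
  simp [pv_sw_short _ h]

theorem pv_main (s : String) :
    pvLoopA s pvPrefixes = pvDispatch s.toList := by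
  rcases h : s.toList with _ | ⟨c0, _ | ⟨c1, _ | ⟨c2, _ | ⟨c3, rest⟩⟩⟩⟩
  · rw [pv_chain_short s (by rw [h]; simp)]; rfl
  · rw [pv_chain_short s (by rw [h]; simp)]; rfl
  · rw [pv_chain_short s (by rw [h]; simp)]; rfl
  · rw [pv_chain_short s (by rw [h]; simp)]; rfl
  · rw [pv_chain_eq_tree s c0 c1 c2 c3 rest h]; rfl

-- ===== VERDICT (by name: the statement is the Claim_ definition above) =====
theorem classify_product_spec : Claim_equal_classify_product := by
  intro cn_code _
  exact pv_main (PySem.Str.replace (PySem.Str.replace cn_code " " "") "." "")
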